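-- pv_equiv track=rewrite | github.com/jamescorbin/algorithms | algorithms/min_pallindrome_partitioning.py | make_pall_indicator
-- ===== SOURCE A (Python) =====
-- from typing import List
--
-- def make_pall_indicator(s: str) -> List[List[bool]]:
--     n = len(s)
--     is_pall = [[False for i in range(n)]
--                 for j in range(n)]
--     for i in range(n):
--         is_pall[i][i] = True
--     for i in range(n - 1):
--         if s[i] == s[i + 1]:
--             is_pall[i][i + 1] = True
--     for width in range(2, n):
--         for i in range(n - width):
--             j = i + width
--             if s[i] == s[j] and is_pall[i + 1][j - 1]:
--                 is_pall[i][j] = True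
--     return is_pall
-- ===== SOURCE B (Python) =====
-- def make_pall_indicator(s):
--     n = len(s)
--     return [[i <= j and s[i:j + 1] == s[i:j + 1][::-1] for j in range(n)]
--             for i in range(n)]
-- ===== Notes on version B (the rewrite author's own statement) =====
-- stated objective: simpler
-- what changed: Replaces the width-indexed DP with in-place table updates by a direct per-cell palindrome test: each entry [i][j] is just i <= j and s[i:j+1] == s[i:j+1][::-1], built in one nested comprehension.
import Mathlib
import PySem

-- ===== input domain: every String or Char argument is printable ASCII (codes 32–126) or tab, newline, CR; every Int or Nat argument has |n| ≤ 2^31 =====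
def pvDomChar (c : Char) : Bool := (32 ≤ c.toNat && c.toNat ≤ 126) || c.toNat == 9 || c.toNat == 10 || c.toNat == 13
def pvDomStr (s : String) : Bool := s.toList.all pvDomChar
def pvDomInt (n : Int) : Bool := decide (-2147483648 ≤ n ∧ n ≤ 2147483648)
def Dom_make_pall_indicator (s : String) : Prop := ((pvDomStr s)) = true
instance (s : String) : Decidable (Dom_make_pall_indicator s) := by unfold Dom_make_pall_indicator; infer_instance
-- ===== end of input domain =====

-- B replaces A's width-indexed DP over a mutable table by a direct per-cell
-- palindrome test (i ≤ j and s[i:j+1] == s[i:j+1][::-1]); simpler, not faster.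

-- ===== PORT A =====
-- The mutable n×n matrix is held as a function Nat → Nat → Bool updated in
-- place (pvPallSet = `is_pall[i][j] = v`) and rendered to lists at the return.
def pvPallSet (m : Nat → Nat → Bool) (i j : Nat) (v : Bool) : Nat → Nat → Bool :=
  fun a b => if a = i ∧ b = j then v else m a b

-- for i in range(k): is_pall[i][i] = True
def pvDiag (k : Nat) (m : Nat → Nat → Bool) : Nat → Nat → Bool :=
  (List.range k).foldl (fun m i => pvPallSet m i i true) m

-- for i in range(k): if s[i] == s[i+1]: is_pall[i][i+1] = True
def pvAdj (l : List Char) (k : Nat) (m : Nat → Nat → Bool) : Nat → Nat → Bool :=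
  (List.range k).foldl (fun m i => if l[i]! = l[i+1]! then pvPallSet m i (i+1) true else m) m

-- inner loop of the DP: for i in range(k): j = i + w; if s[i]==s[j] and is_pall[i+1][j-1]: …
def pvWidth (l : List Char) (w k : Nat) (m : Nat → Nat → Bool) : Nat → Nat → Bool :=
  (List.range k).foldl (fun m i =>
    let j := i + w
    if l[i]! = l[j]! ∧ m (i+1) (j-1) = true then pvPallSet m i j true else m) m

def make_pall_indicator (s : String) : List (List Bool) :=
  let l := s.toList
  let n := l.length
  let m0 : Nat → Nat → Bool := fun _ _ => false
  let m1 := pvDiag n m0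
  let m2 := pvAdj l (n - 1) m1
  -- for width in range(2, n):  (List.range' 2 (n-2) = [2, …, n-1])
  let m3 := (List.range' 2 (n - 2)).foldl (fun m width => pvWidth l width (n - width) m) m2
  (List.range n).map (fun i => (List.range n).map (fun j => m3 i j))

-- ===== PORT B =====
def make_pall_indicator_alt (s : String) : List (List Bool) :=
  let l := s.toList
  let n := l.length
  (List.range n).map (fun (i : Nat) => (List.range n).map (fun (j : Nat) =>
    decide (i ≤ j) &&
      -- s[i:j+1] == s[i:j+1][::-1]  (full slice with step -1 is the reverse)
      decide (PySem.List.slice l (some (i : Int)) (some ((j : Int) + 1)) =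
              (PySem.List.slice l (some (i : Int)) (some ((j : Int) + 1))).reverse)))

-- ===== PRECONDITION & SPEC =====
def Spec_make_pall_indicator (s : String) (out : List (List Bool)) : Prop := out = make_pall_indicator_alt s
instance (s : String) (out : List (List Bool)) : Decidable (Spec_make_pall_indicator s out) := by unfold Spec_make_pall_indicator; infer_instance

-- ===== CLAIM (what is proved, stated in full; the proofs are below) =====
def Claim_equal_make_pall_indicator : Prop := ∀ (s : String), Dom_make_pall_indicator s → Spec_make_pall_indicator s (make_pall_indicator s)

-- ===== LEMMAS AND PROOFS =====

theorem pvPallSet_apply (m : Nat → Nat → Bool) (i j a b : Nat) (v : Bool) :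
    pvPallSet m i j v a b = if a = i ∧ b = j then v else m a b := rfl
theorem pvDiag_apply (k : Nat) (m : Nat → Nat → Bool) (a b : Nat) :
    pvDiag k m a b = if a = b ∧ a < k then true else m a b := by
  induction k generalizing m with
  | zero => simp [pvDiag]
  | succ k ih =>
    simp only [pvDiag, List.range_succ, List.foldl_append, List.foldl_cons, List.foldl_nil]
    rw [show ((List.range k).foldl (fun m i => pvPallSet m i i true) m) = pvDiag k m from rfl,
        pvPallSet_apply, ih]
    split_ifs with h1 h2 h3 h4 h5 <;> first | rfl | omega
theorem pvAdj_apply (l : List Char) (k : Nat) (m : Nat → Nat → Bool) (a b : Nat) :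
    pvAdj l k m a b = if b = a + 1 ∧ a < k ∧ l[a]! = l[b]! then true else m a b := by
  induction k generalizing m with
  | zero => simp [pvAdj]
  | succ k ih =>
    simp only [pvAdj, List.range_succ, List.foldl_append, List.foldl_cons, List.foldl_nil]
    rw [show ((List.range k).foldl (fun m i => if l[i]! = l[i+1]! then pvPallSet m i (i+1) true else m) m) = pvAdj l k m from rfl]
    by_cases hc : l[k]! = l[k+1]!
    · rw [if_pos hc, pvPallSet_apply, ih]
      by_cases h1 : a = k ∧ b = k + 1
      · rw [if_pos h1, if_pos ⟨by omega, by omega, by rw [h1.1, h1.2]; exact hc⟩]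
      · rw [if_neg h1]
        by_cases h2 : b = a + 1 ∧ a < k ∧ l[a]! = l[b]!
        · rw [if_pos h2, if_pos ⟨h2.1, by omega, h2.2.2⟩]
        · rw [if_neg h2, if_neg]
          rintro ⟨e1, e2, e3⟩
          rcases Nat.lt_succ_iff_lt_or_eq.mp e2 with h | h
          · exact h2 ⟨e1, h, e3⟩
          · exact h1 ⟨h, by omega⟩
    · rw [if_neg hc, ih]
      by_cases h2 : b = a + 1 ∧ a < k ∧ l[a]! = l[b]!
      · rw [if_pos h2, if_pos ⟨h2.1, by omega, h2.2.2⟩]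
      · rw [if_neg h2, if_neg]
        rintro ⟨e1, e2, e3⟩
        rcases Nat.lt_succ_iff_lt_or_eq.mp e2 with h | h
        · exact h2 ⟨e1, h, e3⟩
        · subst h; subst e1; exact hc e3
theorem pvWidth_apply (l : List Char) (w k : Nat) (m : Nat → Nat → Bool) (a b : Nat) :
    pvWidth l w k m a b =
      if b = a + w ∧ a < k ∧ l[a]! = l[a+w]! ∧ m (a+1) (a+w-1) = true then true
      else m a b := by
  induction k generalizing a b with
  | zero => simp [pvWidth]
  | succ k ih =>
    have hstep : pvWidth l w (k+1) m =
        (if l[k]! = l[k+w]! ∧ (pvWidth l w k m) (k+1) (k+w-1) = true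
         then pvPallSet (pvWidth l w k m) k (k+w) true else (pvWidth l w k m)) := by
      simp only [pvWidth, List.range_succ, List.foldl_append, List.foldl_cons, List.foldl_nil]
    have hread : pvWidth l w k m (k+1) (k+w-1) = m (k+1) (k+w-1) := by
      rw [ih]; rw [if_neg]; rintro ⟨e, _⟩; omega
    rw [hstep]
    by_cases hc : l[k]! = l[k+w]! ∧ pvWidth l w k m (k+1) (k+w-1) = true
    · rw [if_pos hc, pvPallSet_apply, ih]
      by_cases h1 : a = k ∧ b = k + w
      · rw [if_pos h1, if_pos ⟨by omega, by omega, by rw [h1.1]; exact hc.1,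
          by rw [h1.1]; rw [← hread]; exact hc.2⟩]
      · rw [if_neg h1]
        by_cases h2 : b = a + w ∧ a < k ∧ l[a]! = l[a+w]! ∧ m (a+1) (a+w-1) = true
        · rw [if_pos h2, if_pos ⟨h2.1, by omega, h2.2.2⟩]
        · rw [if_neg h2, if_neg]
          rintro ⟨e1, e2, e3, e4⟩
          rcases Nat.lt_succ_iff_lt_or_eq.mp e2 with h | h
          · exact h2 ⟨e1, h, e3, e4⟩
          · exact h1 ⟨h, by omega⟩
    · rw [if_neg hc, ih]
      by_cases h2 : b = a + w ∧ a < k ∧ l[a]! = l[a+w]! ∧ m (a+1) (a+w-1) = true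
      · rw [if_pos h2, if_pos ⟨h2.1, by omega, h2.2.2⟩]
      · rw [if_neg h2, if_neg]
        rintro ⟨e1, e2, e3, e4⟩
        rcases Nat.lt_succ_iff_lt_or_eq.mp e2 with h | h
        · exact h2 ⟨e1, h, e3, e4⟩
        · subst h; subst e1; exact hc ⟨e3, by rw [hread]; exact e4⟩
def pvInd (l : List Char) (a b : Nat) : Bool :=
  decide ((l.drop a).take (b + 1 - a) = ((l.drop a).take (b + 1 - a)).reverse)

theorem pal_cons_append (x y : Char) (ys : List Char) :
    (x :: ys ++ [y] = (x :: ys ++ [y]).reverse) ↔ (x = y ∧ ys = ys.reverse) := by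
  constructor
  · intro h
    have h' : x :: (ys ++ [y]) = y :: (ys.reverse ++ [x]) := by
      simpa [List.reverse_cons, List.reverse_append] using h
    obtain ⟨hxy, ht⟩ := List.cons_eq_cons.mp h'
    subst hxy
    exact ⟨rfl, List.append_cancel_right ht⟩
  · rintro ⟨hxy, hys⟩
    subst hxy
    simp only [List.reverse_cons, List.reverse_append,]
    rw [← hys]
    rfl

theorem pvInd_diag (l : List Char) (a : Nat) (ha : a < l.length) : pvInd l a a = true := by
  unfold pvInd
  rw [show a + 1 - a = 1 from by omega, List.drop_eq_getElem_cons ha,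
      show (1:Nat) = 0 + 1 from rfl, List.take_succ_cons]
  simp

theorem pvGetBang (l : List Char) (a : Nat) (ha : a < l.length) : l[a]! = l[a] := by
  simp [List.getElem!_eq_getElem?_getD, List.getElem?_eq_getElem ha]

theorem pvInd_rec (l : List Char) (a b : Nat) (hab : a < b) (hb : b < l.length) :
    pvInd l a b = (decide (l[a]! = l[b]!) && pvInd l (a+1) (b-1)) := by
  have ha : a < l.length := lt_trans hab hb
  have hxs : (l.drop a).take (b + 1 - a) =
      l[a] :: ((l.drop (a+1)).take (b - 1 + 1 - (a+1))) ++ [l[b]] := by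
    rw [List.drop_eq_getElem_cons ha,
        show b + 1 - a = (b - a - 1) + 1 + 1 from by omega]
    rw [List.take_succ_cons, List.take_add_one]
    have hget : (l.drop (a+1))[b - a - 1]? = some l[b] := by
      rw [List.getElem?_drop]
      rw [show a + 1 + (b - a - 1) = b from by omega]
      exact List.getElem?_eq_getElem hb
    rw [hget, show b - 1 + 1 - (a+1) = b - a - 1 from by omega]
    simp
  unfold pvInd
  rw [hxs, pvGetBang l a ha, pvGetBang l b hb, Bool.eq_iff_iff]
  simp only [pal_cons_append, decide_eq_true_eq, Bool.and_eq_true]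
theorem pvInd_lt (l : List Char) (a b : Nat) (h : b + 1 ≤ a) : pvInd l a b = true := by
  unfold pvInd; rw [show b + 1 - a = 0 from by omega]; simp

def pvInv (l : List Char) (w : Nat) (m : Nat → Nat → Bool) : Prop :=
  ∀ a b, (b < a → m a b = false) ∧
    (a ≤ b → b < l.length →
      ((b - a < w → m a b = pvInd l a b) ∧ (w ≤ b - a → m a b = false)))

theorem pvInv_base (l : List Char) :
    pvInv l 2 (pvAdj l (l.length - 1) (pvDiag l.length (fun _ _ => false))) := by
  intro a b
  refine ⟨fun hba => ?_, fun hab hb => ⟨fun hlt => ?_, fun hge => ?_⟩⟩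
  · rw [pvAdj_apply, if_neg (by rintro ⟨e, _, _⟩; omega),
        pvDiag_apply, if_neg (by rintro ⟨e, _⟩; omega)]
  · have : b = a ∨ b = a + 1 := by omega
    rcases this with h1 | h1 <;> subst h1
    · rw [pvAdj_apply, if_neg (by rintro ⟨e, _, _⟩; omega),
          pvDiag_apply, if_pos ⟨rfl, by omega⟩]
      exact (pvInd_diag l _ hb).symm
    · rw [pvAdj_apply, pvInd_rec l a (a+1) (by omega) hb,
          show a + 1 - 1 = a from by omega]
      by_cases hc : l[a]! = l[a+1]!
      · rw [if_pos ⟨rfl, by omega, hc⟩, pvInd_lt l (a+1) a (by omega),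
            decide_eq_true hc, Bool.and_true]
      · rw [if_neg (by rintro ⟨_, _, e⟩; exact hc e),
            pvDiag_apply, if_neg (by rintro ⟨e, _⟩; omega),
            decide_eq_false hc, Bool.false_and]
  · rw [pvAdj_apply, if_neg (by rintro ⟨e, _, _⟩; omega),
        pvDiag_apply, if_neg (by rintro ⟨e, _⟩; omega)]

theorem pvInv_step (l : List Char) (w : Nat) (hw : 2 ≤ w) (m : Nat → Nat → Bool)
    (h : pvInv l w m) : pvInv l (w + 1) (pvWidth l w (l.length - w) m) := by
  intro a b
  refine ⟨fun hba => ?_, fun hab hb => ⟨fun hlt => ?_, fun hge => ?_⟩⟩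
  · rw [pvWidth_apply, if_neg (by rintro ⟨e, _⟩; omega)]
    exact (h a b).1 hba
  · by_cases hbw : b - a = w
    · have hb' : b = a + w := by omega
      subst hb'
      have hmid : m (a+1) (a+w-1) = pvInd l (a+1) (a+w-1) :=
        ((h (a+1) (a+w-1)).2 (by omega) (by omega)).1 (by omega)
      rw [pvWidth_apply, pvInd_rec l a (a+w) (by omega) hb,
          show a + w - 1 = a + w - 1 from rfl]
      by_cases hc : l[a]! = l[a+w]! ∧ pvInd l (a+1) (a+w-1) = true
      · rw [if_pos ⟨rfl, by omega, hc.1, by rw [hmid]; exact hc.2⟩,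
            hc.2, decide_eq_true hc.1, Bool.and_true]
      · rw [if_neg (by rintro ⟨_, _, e3, e4⟩; exact hc ⟨e3, by rw [← hmid]; exact e4⟩)]
        rw [((h a (a+w)).2 (by omega) hb).2 (by omega)]
        by_cases h3 : l[a]! = l[a+w]!
        · have h4 : pvInd l (a+1) (a+w-1) = false := by
            cases hpz : pvInd l (a+1) (a+w-1)
            · rfl
            · exact absurd ⟨h3, hpz⟩ hc
          rw [h4, Bool.and_false]
        · rw [decide_eq_false h3, Bool.false_and]
    · rw [pvWidth_apply, if_neg (by rintro ⟨e, _⟩; omega)]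
      exact ((h a b).2 hab hb).1 (by omega)
  · rw [pvWidth_apply, if_neg (by rintro ⟨e, _⟩; omega)]
    exact ((h a b).2 hab hb).2 (by omega)

theorem pvInv_fold (l : List Char) (k : Nat) : ∀ (w : Nat) (m : Nat → Nat → Bool), 2 ≤ w →
    pvInv l w m →
    pvInv l (w + k) ((List.range' w k).foldl (fun m width => pvWidth l width (l.length - width) m) m) := by
  induction k with
  | zero => intro w m _ h; simpa using h
  | succ k ih =>
    intro w m hw h
    rw [List.range'_succ, List.foldl_cons]
    have := ih (w+1) (pvWidth l w (l.length - w) m) (by omega) (pvInv_step l w hw m h)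
    rw [show w + 1 + k = w + (k + 1) from by omega] at this
    exact this

-- ===== VERDICT (by name: the statement is the Claim_ definition above) =====
theorem make_pall_indicator_spec : Claim_equal_make_pall_indicator := by
  intro s _
  unfold Spec_make_pall_indicator
  dsimp only [make_pall_indicator, make_pall_indicator_alt]
  have hInv : pvInv s.toList (2 + (s.toList.length - 2))
      ((List.range' 2 (s.toList.length - 2)).foldl
        (fun m width => pvWidth s.toList width (s.toList.length - width) m)
        (pvAdj s.toList (s.toList.length - 1) (pvDiag s.toList.length (fun _ _ => false)))) :=
    pvInv_fold s.toList (s.toList.length - 2) 2 _ (le_refl 2) (pvInv_base s.toList)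
  apply List.map_congr_left
  intro i hi
  apply List.map_congr_left
  intro j hj
  rw [List.mem_range] at hi hj
  have hslice : PySem.List.slice s.toList (some (i : Int)) (some ((j : Int) + 1)) =
      (s.toList.drop i).take (j + 1 - i) := by
    rw [show ((j : Int) + 1) = (((j + 1 : Nat) : Int)) from by push_cast; ring]
    exact PySem.List.slice_natCast s.toList i (j + 1)
  rw [hslice]
  by_cases hij : i ≤ j
  · rw [((hInv i j).2 hij hj).1 (by omega), decide_eq_true hij, Bool.true_and]
    rfl
  · rw [(hInv i j).1 (by omega), decide_eq_false hij, Bool.false_and]
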